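-- pv_equiv track=rewrite | github.com/AnaClaraZoppiSerpa/Research | code/mds/mds_search/search.py | array_to_left_circulant_matrix
-- ===== SOURCE A (Python) =====
-- def array_to_left_circulant_matrix(array):
--     first_row = list(array)
--     dim = len(first_row)
--
--     rows = []
--     prev_row = []
--
--     for i in range(dim):
--         if i == 0:
--             rows.append(first_row)
--             prev_row = first_row
--         else:
--             new_row = prev_row[1:]
--             new_last = prev_row[0]
--             new_row += [new_last]
--             rows.append(new_row)
--             prev_row = new_row
--     return rows
-- ===== SOURCE B (Python) =====
-- def array_to_left_circulant_matrix(array):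
--     first_row = list(array)
--     dim = len(first_row)
--     rows = []
--     for i in range(dim):
--         rows.append(first_row[i:] + first_row[:i])
--     return rows
-- ===== Notes on version B (the rewrite author's own statement) =====
-- stated objective: simpler
-- what changed: Each row is computed independently as the modular slice first_row[i:]+first_row[:i] of the source array, removing A's prev_row accumulator and the row-to-row rotation dependency.
import Mathlib
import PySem

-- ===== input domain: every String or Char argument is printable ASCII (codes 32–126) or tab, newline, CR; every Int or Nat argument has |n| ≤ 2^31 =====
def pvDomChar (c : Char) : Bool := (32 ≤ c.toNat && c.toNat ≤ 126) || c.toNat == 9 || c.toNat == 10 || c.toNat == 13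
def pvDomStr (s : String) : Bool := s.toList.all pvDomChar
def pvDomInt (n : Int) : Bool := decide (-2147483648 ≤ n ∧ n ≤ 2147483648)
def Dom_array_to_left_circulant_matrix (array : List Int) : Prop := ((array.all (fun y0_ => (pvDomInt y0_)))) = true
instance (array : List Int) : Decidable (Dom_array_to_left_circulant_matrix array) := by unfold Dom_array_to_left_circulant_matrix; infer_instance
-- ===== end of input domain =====

-- B computes each row independently as the modular slice array[i:]+array[:i], replacing A's prev_row rotation chain (objective: simpler).


-- ===== PORT A =====
-- state-threading rotation loop: row i is the previous row rotated left by one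
def array_to_left_circulant_matrix (array : List Int) : List (List Int) :=
  let first_row := array
  let dim : Int := (first_row.length : Int)
  let st :=
    (PySem.List.pyRange 0 dim 1).foldl
      (fun (st : List (List Int) × List Int) i =>
        let rows := st.1
        let prev_row := st.2
        if i == 0 then
          (rows ++ [first_row], first_row)
        else
          let new_row := PySem.List.slice prev_row (some 1) none
          -- prev_row[0]: prev_row is nonempty whenever this branch runs (i ≥ 1 implies dim ≥ 2);
          -- ported by hand as headD, exact on every reachable state
          let new_last := prev_row.headD 0
          let new_row := new_row ++ [new_last]
          (rows ++ [new_row], new_row))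
      ([], [])
  st.1

-- ===== PORT B =====
-- simpler: each row is an independent modular slice of the source array
def array_to_left_circulant_matrix_alt (array : List Int) : List (List Int) :=
  let first_row := array
  let dim : Int := (first_row.length : Int)
  (PySem.List.pyRange 0 dim 1).foldl
    (fun rows i =>
      rows ++ [PySem.List.slice first_row (some i) none ++ PySem.List.slice first_row none (some i)])
    []

-- ===== PRECONDITION & SPEC =====
def Spec_array_to_left_circulant_matrix (array : List Int) (out : List (List Int)) : Prop := out = array_to_left_circulant_matrix_alt array
instance (array : List Int) (out : List (List Int)) : Decidable (Spec_array_to_left_circulant_matrix array out) := by unfold Spec_array_to_left_circulant_matrix; infer_instance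

-- ===== CLAIM (what is proved, stated in full; the proofs are below) =====
def Claim_equal_array_to_left_circulant_matrix : Prop := ∀ (array : List Int), Dom_array_to_left_circulant_matrix array → Spec_array_to_left_circulant_matrix array (array_to_left_circulant_matrix array)

-- ===== LEMMAS AND PROOFS =====

-- rotating row k left by one yields row (k+1)
theorem pv_rot_drop_take (l : List Int) (k : Nat) (h : k < l.length) :
    (l.drop k ++ l.take k).tail ++ [(l.drop k ++ l.take k).headD 0]
      = l.drop (k+1) ++ l.take (k+1) := by
  have hd : l.drop k = l[k] :: l.drop (k+1) := List.drop_eq_getElem_cons h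
  rw [hd]
  simp only [List.cons_append, List.tail_cons, List.headD_cons, List.take_add_one,
    List.getElem?_eq_getElem h, Option.toList_some, List.append_assoc]

-- invariant of A's rotation loop: with prev_row = row i, the remaining fold appends rows i+1 .. len-1
theorem pv_A_loop (l : List Int) (m : Nat) : ∀ (i : Nat) (rows : List (List Int)), i + 1 + m = l.length →
    ((PySem.List.pyRange ((i : Int)+1) (l.length : Int) 1).foldl
      (fun (st : List (List Int) × List Int) j =>
        if j == 0 then (st.1 ++ [l], l)
        else (st.1 ++ [st.2.tail ++ [st.2.headD 0]], st.2.tail ++ [st.2.headD 0]))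
      (rows, l.drop i ++ l.take i)).1
    = rows ++ (List.range' (i+1) m).map (fun k => l.drop k ++ l.take k) := by
  induction m with
  | zero =>
      intro i rows h
      have : ((i : Int) + 1) = (l.length : Int) := by omega
      simp [this]
  | succ m ih =>
      intro i rows h
      have hlt : ((i : Int) + 1) < (l.length : Int) := by omega
      rw [PySem.List.pyRange_one_cons hlt]
      have hi : i < l.length := by omega
      simp only [List.foldl_cons]
      rw [if_neg (show ¬ ((((i : Int) + 1) == 0) = true) by simp; omega)]
      rw [pv_rot_drop_take l i hi]
      have := ih (i+1) (rows ++ [l.drop (i+1) ++ l.take (i+1)]) (by omega)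
      push_cast at this ⊢
      rw [this]
      simp [List.range'_succ]

-- a fold that only appends is a map
theorem pv_foldl_append_map (F : Int → List Int) (xs : List Int) : ∀ (rows : List (List Int)),
    xs.foldl (fun r x => r ++ [F x]) rows = rows ++ xs.map F := by
  induction xs with
  | nil => intro rows; simp
  | cons x xs ih => intro rows; simp [ih]

-- ===== VERDICT (by name: the statement is the Claim_ definition above) =====
-- canonical form of B
theorem pv_B_eq (l : List Int) :
    array_to_left_circulant_matrix_alt l
      = (List.range l.length).map (fun k => l.drop k ++ l.take k) := by
  unfold array_to_left_circulant_matrix_alt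
  rw [pv_foldl_append_map, PySem.List.pyRange_one]
  simp [PySem.List.slice_from_natCast, PySem.List.slice_to_natCast]

theorem array_to_left_circulant_matrix_spec : Claim_equal_array_to_left_circulant_matrix := by
  intro array _
  unfold Spec_array_to_left_circulant_matrix
  rw [pv_B_eq]
  unfold array_to_left_circulant_matrix
  dsimp only
  cases array with
  | nil => simp
  | cons a as =>
    rw [PySem.List.pyRange_one_cons (show (0:Int) < (((a :: as).length : Nat) : Int) by exact_mod_cast (as.length).succ_pos)]
    simp only [List.foldl_cons, beq_self_eq_true, if_true, PySem.List.slice_from_one]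
    have HA := pv_A_loop (a :: as) as.length 0 [a :: as] (by simp; omega)
    push_cast at HA
    simp only [List.drop_zero, List.take_zero, List.append_nil, List.nil_append] at HA ⊢
    rw [zero_add, HA]
    rw [List.range_eq_range', List.length_cons, List.range'_succ]
    simp
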